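-- pv_equiv track=rewrite | github.com/yuejin12345/Python | precourse-assignment-master/assessment/solutions.py | double_letter_words
-- ===== SOURCE A (Python) =====
-- def double_letter_words(string):
--     '''
--     Get all the words that have two consecutive repeating letters
--
--     Parameters
--     ----------
--     string: a string of words separated by spaces
--
--     Returns
--     -------
--     a list of all words that contain at least one occurrence of
--     consecutive repeating letters
--     '''
--     doubles = []
--     words = string.split()
--     for word in words:
--         prev_char = ''
--         for char in word:
--             if char == prev_char:
--                 doubles.append(word)
--                 break
--             prev_char = char
--     return doubles
-- ===== SOURCE B (Python) =====
-- def double_letter_words(string):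
--     # Single fused pass over the raw characters: build each word on the fly,
--     # track a "has a double" flag, and flush at whitespace boundaries
--     # (a trailing sentinel space flushes the last word). No split(), no
--     # per-word rescan.
--     doubles = []
--     cur = []
--     has_double = False
--     for c in string + " ":
--         if c.isspace():
--             if cur and has_double:
--                 doubles.append("".join(cur))
--             cur = []
--             has_double = False
--         else:
--             if cur and c == cur[-1]:
--                 has_double = True
--             cur.append(c)
--     return doubles
-- ===== Notes on version B (the rewrite author's own statement) =====
-- stated objective: alternative
-- what changed: Replaces split()-then-per-word-inner-scan with one fused character-level state machine over the raw string that builds words and the double-letter flag simultaneously and flushes at whitespace boundaries.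
import Mathlib
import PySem

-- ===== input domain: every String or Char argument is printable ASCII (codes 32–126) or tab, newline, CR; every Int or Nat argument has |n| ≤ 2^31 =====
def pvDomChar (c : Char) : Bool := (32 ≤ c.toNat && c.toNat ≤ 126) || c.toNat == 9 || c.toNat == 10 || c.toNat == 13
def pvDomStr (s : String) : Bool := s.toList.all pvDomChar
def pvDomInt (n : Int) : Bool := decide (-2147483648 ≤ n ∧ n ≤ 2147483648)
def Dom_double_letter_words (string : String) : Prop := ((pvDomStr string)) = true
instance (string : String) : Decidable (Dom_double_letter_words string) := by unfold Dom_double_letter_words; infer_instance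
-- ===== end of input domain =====

-- B replaces A's split()-then-per-word-inner-scan with one fused character-level state
-- machine over the raw string (builds each word and its double-letter flag on the fly,
-- flushing at whitespace boundaries); alternative decomposition, same cost.

-- ===== PORT A =====
-- A's inner loop: prev_char starts as '' (matches no char), ported as Option Char = none;
-- the break-and-append is the 'true' result of this scan.
def pvInnerA (cs : List Char) (prev : Option Char) : Bool :=
  match cs with
  | [] => false
  | c :: rest => if some c == prev then true else pvInnerA rest (some c)

def double_letter_words (string : String) : List String :=
  (PySem.Str.split₀ string).foldl
    (fun doubles word => if pvInnerA word.toList none then doubles ++ [word] else doubles) []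

-- ===== PORT B =====
-- One step of Source B's loop body; state = (doubles, cur, has_double).
-- 'cur and c == cur[-1]' is (!cur.isEmpty && (PySem.List.pyGet? cur (-1) == some c));
-- '"".join(cur)' is String.ofList cur.
def pvStepB (st : List String × List Char × Bool) (c : Char) :
    List String × List Char × Bool :=
  let (doubles, cur, hd) := st
  if PySem.Chars.isspace c then
    (if !cur.isEmpty && hd then doubles ++ [String.ofList cur] else doubles, [], false)
  else
    (doubles, cur ++ [c],
      if !cur.isEmpty && (PySem.List.pyGet? cur (-1) == some c) then true else hd)

-- 'for c in string + " "' : fold pvStepB over the chars of string ++ " ".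
def double_letter_words_alt (string : String) : List String :=
  ((string.toList ++ [' ']).foldl pvStepB ([], [], false)).1

-- ===== PRECONDITION & SPEC =====
def Spec_double_letter_words (string : String) (out : List String) : Prop := out = double_letter_words_alt string
instance (string : String) (out : List String) : Decidable (Spec_double_letter_words string out) := by unfold Spec_double_letter_words; infer_instance

-- ===== CLAIM (what is proved, stated in full; the proofs are below) =====
def Claim_equal_double_letter_words : Prop := ∀ (string : String), Dom_double_letter_words string → Spec_double_letter_words string (double_letter_words string)

-- ===== LEMMAS AND PROOFS =====

-- adjacency test: some pair of consecutive chars is equal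
def pvAdj (cs : List Char) : Bool := (cs.zip cs.tail).any (fun p => p.1 == p.2)

-- the words of split₀.go with the accumulator externalized
def pvWords (cs : List Char) (curR : List Char) : List (List Char) :=
  match cs with
  | [] => if curR.isEmpty then [] else [curR.reverse]
  | c :: rest =>
    if PySem.Chars.isspace c then
      if curR.isEmpty then pvWords rest [] else curR.reverse :: pvWords rest []
    else pvWords rest (c :: curR)

theorem pvInnerA_some (cs : List Char) (p : Char) :
    pvInnerA cs (some p) =
      (match cs with
       | [] => false
       | c :: _ => (p == c) || pvAdj cs) := by
  induction cs generalizing p with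
  | nil => rfl
  | cons c rest ih =>
    by_cases h : c = p
    · subst h; simp [pvInnerA]
    · have hb : (p == c) = false := by
        simp only [beq_eq_false_iff_ne, ne_eq]; exact fun hp => h hp.symm
      have hb2 : ((some c : Option Char) == some p) = false := by
        simp only [beq_eq_false_iff_ne, ne_eq, Option.some.injEq]; exact h
      simp only [pvInnerA, hb2, Bool.false_eq_true, if_false, ih]
      cases rest with
      | nil => simp [hb, pvAdj]
      | cons d rs => simp [hb, pvAdj, List.any_cons]

theorem pvInnerA_none (cs : List Char) : pvInnerA cs none = pvAdj cs := by
  cases cs with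
  | nil => rfl
  | cons c rest =>
    simp only [pvInnerA]
    rw [pvInnerA_some]
    cases rest with
    | nil => rfl
    | cons d rs => simp [pvAdj, List.any_cons]

-- split₀.go with its accumulator pulled out front
theorem pvWords_go (cs curR : List Char) (acc : List (List Char)) :
    PySem.Chars.split₀.go cs curR acc = acc.reverse ++ pvWords cs curR := by
  induction cs generalizing curR acc with
  | nil =>
    by_cases h : curR.isEmpty
    · simp [PySem.Chars.split₀.go, pvWords, h]
    · simp [PySem.Chars.split₀.go, pvWords, h]
  | cons c rest ih =>
    by_cases hs : PySem.Chars.isspace c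
    · by_cases h : curR.isEmpty
      · simp [PySem.Chars.split₀.go, pvWords, hs, h, ih]
      · simp [PySem.Chars.split₀.go, pvWords, hs, h, ih]
    · simp [PySem.Chars.split₀.go, pvWords, hs, ih]

theorem split₀_eq_pvWords (cs : List Char) :
    PySem.Chars.split₀ cs = pvWords cs [] := by
  simp [PySem.Chars.split₀, pvWords_go]

-- snoc step of the adjacency test = Source B's flag update
theorem pvAdj_snoc (cur : List Char) (c : Char) :
    pvAdj (cur ++ [c]) =
      (pvAdj cur || (!cur.isEmpty && (cur.getLast? == some c))) := by
  induction cur with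
  | nil => simp [pvAdj]
  | cons a t ih =>
    cases t with
    | nil => simp [pvAdj]
    | cons b r =>
      simp only [pvAdj, List.cons_append, List.tail_cons, List.zip_cons_cons,
        List.any_cons, List.getLast?_cons_cons] at *
      rw [ih]
      cases h : (a == b) <;> simp

-- for nonempty cur, cur[-1] is its last element
theorem pyGet_neg_one (cur : List Char) (h : cur ≠ []) :
    PySem.List.pyGet? cur (-1) = cur.getLast? := by
  have hl : cur.length ≠ 0 := by simpa using h
  simp only [PySem.List.pyGet?, PySem.List.pyIdx?]
  have h0 : ¬ (0 : Int) ≤ -1 := by norm_num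
  have h1 : -(cur.length : Int) ≤ -1 := by omega
  rw [if_neg h0, if_pos h1]
  have h2 : ((- (-1 : Int)).toNat) = 1 := by norm_num
  simp [List.getLast?_eq_getElem?]

-- B's fold over cs ++ [' '] emits exactly the adjacent-repeat words of pvWords
theorem foldB_main (cs : List Char) (ds : List String) (cur : List Char) :
    ((cs ++ [' ']).foldl pvStepB (ds, cur, pvAdj cur)).1
      = ds ++ ((pvWords cs cur.reverse).filter pvAdj).map String.ofList := by
  induction cs generalizing ds cur with
  | nil =>
    have hsp : PySem.Chars.isspace ' ' = true := by decide
    by_cases h : cur = []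
    · subst h; simp [pvStepB, hsp, pvWords, pvAdj]
    · have hne : cur.isEmpty = false := by simp [h]
      simp only [List.nil_append, List.foldl_cons, List.foldl_nil, pvStepB, hsp,
        if_true, hne, Bool.not_false, Bool.true_and, pvWords]
      have : (cur.reverse.isEmpty) = false := by simp [h]
      rw [this]
      simp only [Bool.false_eq_true, if_false, List.reverse_reverse, List.filter]
      cases had : pvAdj cur <;> simp
  | cons c rest ih =>
    by_cases hs : PySem.Chars.isspace c = true
    · by_cases h : cur = []
      · subst h
        simpa [pvStepB, hs, pvWords, pvAdj] using ih ds []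
      · have hne : cur.isEmpty = false := by simp [h]
        have hr : (cur.reverse.isEmpty) = false := by simp [h]
        simp only [List.cons_append, List.foldl_cons, pvStepB, hs, if_true, hne,
          Bool.not_false, Bool.true_and, pvWords, hr, Bool.false_eq_true, if_false,
          List.reverse_reverse]
        have hB : pvAdj ([] : List Char) = false := rfl
        rw [show (false : Bool) = pvAdj [] from rfl]
        rw [ih _ []]
        simp only [List.filter]
        cases had : pvAdj cur <;> simp
    · have hflag :
          (if !cur.isEmpty && (PySem.List.pyGet? cur (-1) == some c) then true else pvAdj cur)
            = pvAdj (cur ++ [c]) := by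
        by_cases h : cur = []
        · subst h; simp [pvAdj]
        · have hne : cur.isEmpty = false := by simp [h]
          rw [pyGet_neg_one cur h, pvAdj_snoc]
          simp only [hne, Bool.not_false, Bool.true_and]
          cases hg : (cur.getLast? == some c) <;> simp
      simp only [List.cons_append, List.foldl_cons, pvStepB, hs, Bool.false_eq_true,
        if_false, hflag]
      rw [ih ds (cur ++ [c])]
      simp [pvWords, hs]

-- A is a filter of the split words
theorem portA_filter (string : String) :
    double_letter_words string
      = (PySem.Str.split₀ string).filter (fun w => pvAdj w.toList) := by
  unfold double_letter_words
  rw [PySem.List.foldl_append_if_eq_filter]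
  simp [pvInnerA_none]

-- ===== VERDICT (by name: the statement is the Claim_ definition above) =====
theorem double_letter_words_spec : Claim_equal_double_letter_words := by
  intro s _
  unfold Spec_double_letter_words
  rw [portA_filter]
  unfold double_letter_words_alt
  have := foldB_main s.toList [] []
  simp only [List.nil_append, List.reverse_nil] at this
  rw [show (false : Bool) = pvAdj [] from rfl, this, ← split₀_eq_pvWords]
  rw [← PySem.Str.split₀_map_toList, List.filter_map, List.map_map]
  simp [Function.comp_def, String.ofList_toList]
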